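-- pv_equiv track=rewrite | github.com/karkirowle/pathbench | extract_easycall_paths.py | get_intersection_texts
-- ===== SOURCE A (Python) =====
-- from collections import defaultdict
--
-- def get_intersection_texts(entries, group_filter="pathological", dtype_filter="word"):
--     filtered = [e for e in entries if e["group"] == group_filter and e["dtype"] == dtype_filter]
--
--     text_to_spk = defaultdict(set)
--     all_spk = set()
--
--     for e in filtered:
--         text_to_spk[e["norm_text"]].add(e["speaker"])
--         all_spk.add(e["speaker"])
--
--     intersection = set()
--     for text, speakers in text_to_spk.items():
--         if speakers == all_spk:
--             intersection.add(text)
--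
--     return intersection, all_spk
-- ===== SOURCE B (Python) =====
-- def get_intersection_texts(entries, group_filter="pathological", dtype_filter="word"):
--     # Inverse indexing: one pass building speaker -> set of texts (plus the distinct
--     # texts seen), then a text is in the intersection iff every speaker's set has it.
--     spk_texts = {}
--     seen_texts = {}
--     for e in entries:
--         if e["group"] == group_filter and e["dtype"] == dtype_filter:
--             t = e["norm_text"]
--             s = e["speaker"]
--             spk_texts.setdefault(s, set()).add(t)
--             seen_texts[t] = None
--     intersection = {t for t in seen_texts
--                     if all(t in ts for ts in spk_texts.values())}
--     return intersection, set(spk_texts)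
-- ===== Notes on version B (the rewrite author's own statement) =====
-- stated objective: alternative
-- what changed: B inverts the index: instead of grouping texts to speaker-sets and comparing each against the full speaker set, it builds speaker -> set-of-texts in one pass and keeps a text iff every speaker's set contains it.
import Mathlib
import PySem

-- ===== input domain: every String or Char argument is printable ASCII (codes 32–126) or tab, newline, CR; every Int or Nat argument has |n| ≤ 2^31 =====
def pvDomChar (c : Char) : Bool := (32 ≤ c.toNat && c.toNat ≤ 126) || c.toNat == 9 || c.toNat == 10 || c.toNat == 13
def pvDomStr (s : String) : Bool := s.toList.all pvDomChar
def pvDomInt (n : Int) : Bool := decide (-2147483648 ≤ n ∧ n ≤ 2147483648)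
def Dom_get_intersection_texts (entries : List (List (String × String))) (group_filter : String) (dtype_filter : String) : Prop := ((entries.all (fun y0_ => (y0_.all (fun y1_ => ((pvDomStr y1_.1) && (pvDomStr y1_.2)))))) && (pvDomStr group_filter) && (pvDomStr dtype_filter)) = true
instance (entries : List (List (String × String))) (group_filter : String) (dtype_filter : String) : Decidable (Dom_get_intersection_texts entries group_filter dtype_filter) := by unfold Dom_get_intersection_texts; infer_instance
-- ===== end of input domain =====

-- B inverts the index (speaker -> texts, membership test per speaker) instead of A's
-- text -> speakers grouping with whole-set comparison; an alternative decomposition, same cost.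


-- e[k] for an entry dict; exact wherever Pre_ guarantees the key is present
def pvGetS (e : List (String × String)) (k : String) : String :=
  ((PySem.Dict.mk e).get? k).getD ""

-- ===== PORT A =====
def get_intersection_texts (entries : List (List (String × String))) (group_filter : String) (dtype_filter : String) : List String × List String :=
  let filtered := entries.filter
    (fun e => pvGetS e "group" == group_filter && pvGetS e "dtype" == dtype_filter)
  -- for e in filtered: text_to_spk[e["norm_text"]].add(e["speaker"]); all_spk.add(e["speaker"])
  let st := filtered.foldl
    (fun (p : PySem.Dict String (PySem.Set String) × PySem.Set String) e =>
      (p.1.modify (pvGetS e "norm_text") PySem.Set.empty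
          (fun ss => PySem.Set.add ss (pvGetS e "speaker")),
       PySem.Set.add p.2 (pvGetS e "speaker")))
    (PySem.Dict.empty, PySem.Set.empty)
  -- for text, speakers in text_to_spk.items(): if speakers == all_spk: intersection.add(text)
  let intersection := st.1.items.foldl
    (fun acc p => if PySem.Set.equal p.2 st.2 then PySem.Set.add acc p.1 else acc)
    PySem.Set.empty
  (intersection, st.2)

-- ===== PORT B =====
def get_intersection_texts_alt (entries : List (List (String × String))) (group_filter : String) (dtype_filter : String) : List String × List String :=
  -- one pass: spk_texts.setdefault(s, set()).add(t)  (= modify s ∅ (add · t));  seen_texts[t] = None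
  let st := entries.foldl
    (fun (p : PySem.Dict String (PySem.Set String) × PySem.Dict String Unit) e =>
      if pvGetS e "group" == group_filter && pvGetS e "dtype" == dtype_filter then
        (p.1.modify (pvGetS e "speaker") PySem.Set.empty
            (fun ss => PySem.Set.add ss (pvGetS e "norm_text")),
         p.2.insert (pvGetS e "norm_text") ())
      else p)
    (PySem.Dict.empty, PySem.Dict.empty)
  -- {t for t in seen_texts if all(t in ts for ts in spk_texts.values())}
  let intersection := PySem.Set.ofList
    ((st.2.keys).filter (fun t => (st.1.values).all (fun ts => PySem.Set.contains ts t)))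
  (intersection, PySem.Set.ofList st.1.keys)

-- ===== PRECONDITION & SPEC =====
-- Pre_ excludes exactly the inputs where Python A raises KeyError: an entry missing
-- "group", or (when its group matches) missing "dtype", or (when both filters match)
-- missing "norm_text" or "speaker".
def Pre_get_intersection_texts (entries : List (List (String × String))) (group_filter : String) (dtype_filter : String) : Prop :=
  ∀ e ∈ entries,
    (PySem.Dict.mk e).contains "group" = true ∧
    (pvGetS e "group" = group_filter →
      (PySem.Dict.mk e).contains "dtype" = true ∧
      (pvGetS e "dtype" = dtype_filter →
        (PySem.Dict.mk e).contains "norm_text" = true ∧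
        (PySem.Dict.mk e).contains "speaker" = true))
instance (entries : List (List (String × String))) (group_filter : String) (dtype_filter : String) : Decidable (Pre_get_intersection_texts entries group_filter dtype_filter) := by unfold Pre_get_intersection_texts; infer_instance

def pvWitness_get_intersection_texts : (List (List (String × String))) × String × String :=
  ([[("group", "g"), ("dtype", "w"), ("norm_text", "hi"), ("speaker", "a")],
    [("group", "g"), ("dtype", "w"), ("norm_text", "hi"), ("speaker", "b")],
    [("group", "g"), ("dtype", "w"), ("norm_text", "yo"), ("speaker", "a")]], "g", "w")

def Spec_get_intersection_texts (entries : List (List (String × String))) (group_filter : String) (dtype_filter : String) (out : List String × List String) : Prop := out = get_intersection_texts_alt entries group_filter dtype_filter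
instance (entries : List (List (String × String))) (group_filter : String) (dtype_filter : String) (out : List String × List String) : Decidable (Spec_get_intersection_texts entries group_filter dtype_filter out) := by unfold Spec_get_intersection_texts; infer_instance

-- ===== CLAIM (what is proved, stated in full; the proofs are below) =====
def Claim_equal_get_intersection_texts : Prop := ∀ (entries : List (List (String × String))) (group_filter : String) (dtype_filter : String), Dom_get_intersection_texts entries group_filter dtype_filter → Pre_get_intersection_texts entries group_filter dtype_filter → Spec_get_intersection_texts entries group_filter dtype_filter (get_intersection_texts entries group_filter dtype_filter)

-- ===== LEMMAS AND PROOFS =====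

-- generic: getD of the "d[key e].add(val e)" grouping fold
theorem getD_modfold {α : Type} (L : List α) (key val : α → String)
    (d : PySem.Dict String (PySem.Set String)) (k : String) :
    (L.foldl (fun dd e => dd.modify (key e) PySem.Set.empty
        (fun ss => PySem.Set.add ss (val e))) d).getD k PySem.Set.empty
      = PySem.Set.update (d.getD k PySem.Set.empty) ((L.filter (fun e => key e == k)).map val) := by
  induction L generalizing d with
  | nil => simp [PySem.Set.update]
  | cons e tl ih =>
    simp only [List.foldl_cons, ih, List.filter_cons]
    by_cases h : key e = k
    · simp [h, PySem.Set.update_cons]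
    · simp [h, PySem.Dict.getD_modify, Ne.symm h]

theorem mem_modfold {α : Type} (L : List α) (key val : α → String) (k s : String) :
    (s ∈ (L.foldl (fun dd e => dd.modify (key e) PySem.Set.empty
        (fun ss => PySem.Set.add ss (val e))) PySem.Dict.empty).getD k PySem.Set.empty)
      ↔ ∃ e ∈ L, key e = k ∧ val e = s := by
  rw [getD_modfold]
  simp [PySem.Dict.getD_empty, PySem.Set.update_nil_left, PySem.Set.mem_ofList]
  constructor
  · rintro ⟨e, ⟨he, hk⟩, hv⟩; exact ⟨e, he, by simpa using hk, hv⟩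
  · rintro ⟨e, he, hk, hv⟩; exact ⟨e, ⟨he, by simpa using hk⟩, hv⟩

theorem keys_modfold {α : Type} (L : List α) (key val : α → String) :
    (L.foldl (fun dd e => dd.modify (key e) PySem.Set.empty
        (fun ss => PySem.Set.add ss (val e))) PySem.Dict.empty).keys
      = PySem.Set.ofList (L.map key) := by
  rw [PySem.Dict.keys_foldl_modify_key]
  simp [PySem.Set.update_nil_left, PySem.Dict.keys_empty]

theorem mem_items_char (d : PySem.Dict String (PySem.Set String)) (h : d.keys.Nodup)
    (p : String × PySem.Set String) :
    p ∈ d.items ↔ p.1 ∈ d.keys ∧ d.getD p.1 PySem.Set.empty = p.2 := by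
  constructor
  · intro hp
    refine ⟨PySem.Dict.mem_keys_of_mem_items d hp, ?_⟩
    exact PySem.Dict.getD_of_mem_items d (by exact hp) h _
  · rintro ⟨hk, hg⟩
    have hc : d.contains p.1 = true := (PySem.Dict.contains_iff_mem_keys _ _).mpr hk
    rcases ho : d.get? p.1 with _ | v
    · rw [PySem.Dict.contains_eq_isSome_get?, ho] at hc; simp at hc
    · have hgv : d.getD p.1 PySem.Set.empty = v := PySem.Dict.getD_of_get?_eq_some d _ ho
      have hpv : p = (p.1, p.2) := rfl
      rw [hpv, ← hg, hgv]
      exact PySem.Dict.mem_items_of_get?_eq_some d ho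

-- the crux: "speakers-of-t == all_spk"  =  "every speaker's text-set contains t"
theorem cond_eq {α : Type} (L : List α) (txt spk : α → String) (t : String) :
    PySem.Set.equal
      ((L.foldl (fun dd e => dd.modify (txt e) PySem.Set.empty
          (fun ss => PySem.Set.add ss (spk e))) PySem.Dict.empty).getD t PySem.Set.empty)
      (PySem.Set.ofList (L.map spk))
    = ((L.foldl (fun dd e => dd.modify (spk e) PySem.Set.empty
          (fun ss => PySem.Set.add ss (txt e))) PySem.Dict.empty).values).all
        (fun ts => PySem.Set.contains ts t) := by
  have hbool : ∀ a b : Bool, (a = true ↔ b = true) → a = b := by decide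
  apply hbool
  set TB := L.foldl (fun dd e => dd.modify (spk e) PySem.Set.empty
      (fun ss => PySem.Set.add ss (txt e))) PySem.Dict.empty with hTB
  have hnodup : TB.keys.Nodup := by
    apply PySem.Dict.nodup_keys_foldl_modify_key
    simp [PySem.Dict.keys_empty]
  have hval : ∀ ts, ts ∈ TB.values ↔ ∃ s, s ∈ TB.keys ∧ TB.getD s PySem.Set.empty = ts := by
    intro ts
    simp only [PySem.Dict.values, List.mem_map]
    constructor
    · rintro ⟨p, hp, rfl⟩
      exact ⟨p.1, ((mem_items_char TB hnodup p).1 hp).1, ((mem_items_char TB hnodup p).1 hp).2⟩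
    · rintro ⟨s, hk, hg⟩
      exact ⟨(s, ts), (mem_items_char TB hnodup (s, ts)).2 ⟨hk, hg⟩, rfl⟩
  rw [PySem.Set.equal_iff, List.all_eq_true]
  constructor
  · intro h ts hts
    rcases (hval ts).1 hts with ⟨s, hk, rfl⟩
    rw [PySem.Set.contains_iff, hTB, mem_modfold]
    rw [hTB, keys_modfold, PySem.Set.mem_ofList, List.mem_map] at hk
    rcases hk with ⟨e0, he0, hs0⟩
    have hs : s ∈ PySem.Set.ofList (L.map spk) := by
      rw [PySem.Set.mem_ofList, List.mem_map]; exact ⟨e0, he0, hs0⟩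
    rcases (mem_modfold L txt spk t s).1 ((h s).2 hs) with ⟨e, he, htx, hsp⟩
    exact ⟨e, he, hsp, htx⟩
  · intro h s
    rw [mem_modfold, PySem.Set.mem_ofList, List.mem_map]
    constructor
    · rintro ⟨e, he, _, hsp⟩; exact ⟨e, he, hsp⟩
    · rintro ⟨e, he, hsp⟩
      have hts : TB.getD s PySem.Set.empty ∈ TB.values := by
        rw [hval]
        refine ⟨s, ?_, rfl⟩
        rw [hTB, keys_modfold, PySem.Set.mem_ofList, List.mem_map]
        exact ⟨e, he, hsp⟩
      have := h _ hts
      rw [PySem.Set.contains_iff, hTB, mem_modfold] at this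
      rcases this with ⟨e', he', hsp', htx'⟩
      exact ⟨e', he', htx', hsp'⟩
theorem main_eq (entries : List (List (String × String))) (g d : String) :
    get_intersection_texts entries g d = get_intersection_texts_alt entries g d := by
  unfold get_intersection_texts get_intersection_texts_alt
  dsimp only
  have hA := PySem.List.foldl_prod_mk
      (fun (dd : PySem.Dict String (PySem.Set String)) (e : List (String × String)) =>
        dd.modify (pvGetS e "norm_text") PySem.Set.empty
          (fun ss => PySem.Set.add ss (pvGetS e "speaker")))
      (fun (s : PySem.Set String) e => PySem.Set.add s (pvGetS e "speaker"))
      (entries.filter (fun e => pvGetS e "group" == g && pvGetS e "dtype" == d))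
      PySem.Dict.empty PySem.Set.empty
  rw [hA]
  have hsplit : (fun (p : PySem.Dict String (PySem.Set String) × PySem.Dict String Unit) e =>
        if pvGetS e "group" == g && pvGetS e "dtype" == d then
          (p.1.modify (pvGetS e "speaker") PySem.Set.empty
              (fun ss => PySem.Set.add ss (pvGetS e "norm_text")),
           p.2.insert (pvGetS e "norm_text") ())
        else p)
      = fun p e =>
          ((fun (dd : PySem.Dict String (PySem.Set String)) e =>
              if pvGetS e "group" == g && pvGetS e "dtype" == d then
                dd.modify (pvGetS e "speaker") PySem.Set.empty
                  (fun ss => PySem.Set.add ss (pvGetS e "norm_text")) else dd) p.1 e,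
           (fun (dd : PySem.Dict String Unit) e =>
              if pvGetS e "group" == g && pvGetS e "dtype" == d then
                dd.insert (pvGetS e "norm_text") () else dd) p.2 e) :=
    funext fun p => funext fun e => by
      by_cases h : (pvGetS e "group" == g && pvGetS e "dtype" == d) <;> simp [h]
  rw [hsplit]
  have hB := PySem.List.foldl_prod_mk
      (fun (dd : PySem.Dict String (PySem.Set String)) e =>
        if pvGetS e "group" == g && pvGetS e "dtype" == d then
          dd.modify (pvGetS e "speaker") PySem.Set.empty
            (fun ss => PySem.Set.add ss (pvGetS e "norm_text")) else dd)
      (fun (dd : PySem.Dict String Unit) e =>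
        if pvGetS e "group" == g && pvGetS e "dtype" == d then
          dd.insert (pvGetS e "norm_text") () else dd)
      entries PySem.Dict.empty PySem.Dict.empty
  rw [hB]
  dsimp only
  rw [PySem.List.foldl_if_eq_foldl_filter, PySem.List.foldl_if_eq_foldl_filter]
  simp only [Prod.mk.injEq]
  refine ⟨?_, ?_⟩
  · -- intersections agree
    rw [show (List.foldl (fun s e => PySem.Set.add s (pvGetS e "speaker")) PySem.Set.empty
          (entries.filter (fun e => pvGetS e "group" == g && pvGetS e "dtype" == d)))
        = PySem.Set.ofList ((entries.filter
            (fun e => pvGetS e "group" == g && pvGetS e "dtype" == d)).map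
              (fun e => pvGetS e "speaker")) from by
      rw [← PySem.Set.update_map_eq_foldl_add, PySem.Set.update_empty]]
    rw [← PySem.Set.update_map_eq_foldl_add
          (f := fun p : String × PySem.Set String => p.1), PySem.Set.update_empty]
    rw [PySem.List.foldl_if_eq_foldl_filter, PySem.Dict.keys_foldl_insert_key,
        PySem.Dict.keys_empty, PySem.Set.update_nil_left]
    rw [← keys_modfold (entries.filter
          (fun e => pvGetS e "group" == g && pvGetS e "dtype" == d))
          (fun e => pvGetS e "norm_text") (fun e => pvGetS e "speaker")]
    simp only [PySem.Dict.keys]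
    rw [List.filter_map]
    congr 1
    congr 1
    apply List.filter_congr
    intro p hp
    have hn : (List.foldl (fun dd e => dd.modify (pvGetS e "norm_text") PySem.Set.empty
        (fun ss => PySem.Set.add ss (pvGetS e "speaker"))) PySem.Dict.empty
        (entries.filter (fun e => pvGetS e "group" == g && pvGetS e "dtype" == d))).keys.Nodup := by
      apply PySem.Dict.nodup_keys_foldl_modify_key
      simp [PySem.Dict.keys_empty]
    have hg := ((mem_items_char _ hn p).1 hp).2
    rw [← hg]
    exact cond_eq _ (fun e => pvGetS e "norm_text") (fun e => pvGetS e "speaker") p.1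
  · -- all_spk agree
    rw [← PySem.Set.update_map_eq_foldl_add
          (l := entries.filter (fun e => pvGetS e "group" == g && pvGetS e "dtype" == d))
          (f := fun e => pvGetS e "speaker") (s := PySem.Set.empty),
        PySem.Set.update_empty, keys_modfold, PySem.Set.ofList_ofList]

-- ===== VERDICT (by name: the statement is the Claim_ definition above) =====
theorem get_intersection_texts_spec : Claim_equal_get_intersection_texts := by
  intro entries group_filter dtype_filter _ _
  exact main_eq entries group_filter dtype_filter
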